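-- pv_equiv track=rewrite | github.com/dguest390/O-Chem-Identifier | Classes/adapter_classes.py | probable_main_atom
-- ===== SOURCE A (Python) =====
-- def probable_main_atom(atom_list: list[str]) -> str:
-- 	bonding_atom = ''
--
-- 	probable_bonding_count = {
-- 		'C':0,
-- 		'N':0,
-- 		'O':0,
-- 		'S': 0,
-- 		'B': 0,
-- 		'P': 0
-- 	}
--
-- 	for letter in atom_list:
-- 		try:
-- 			atom_count = probable_bonding_count[letter]
-- 			atom_count += 1
-- 			probable_bonding_count[letter] = atom_count
-- 		except KeyError:
-- 			# not bonding atom, do nothing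
-- 			pass
--
--
-- 	# Anticipated bonding precedence
-- 	if probable_bonding_count['C'] > 0:
-- 		bonding_atom = 'C'
-- 	elif probable_bonding_count['N'] > 0:
-- 		bonding_atom = 'N'
-- 	elif probable_bonding_count['O'] > 0:
-- 		bonding_atom = 'O'
-- 	elif probable_bonding_count['P'] > 0:
-- 		bonding_atom = 'P'
-- 	elif probable_bonding_count['S'] > 0:
-- 		bonding_atom = 'S'
-- 	elif probable_bonding_count['B'] > 0:
-- 		bonding_atom = 'B'
--
-- 	return bonding_atom
-- ===== SOURCE B (Python) =====
-- def probable_main_atom(atom_list: list[str]) -> str: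
--     # Single pass: fold the selection into the scan by tracking the best
--     # (lowest) precedence rank seen so far; no tally or second phase.
--     rank = {'C': 0, 'N': 1, 'O': 2, 'P': 3, 'S': 4, 'B': 5}
--     best = 6
--     for atom in atom_list:
--         r = rank.get(atom, 6)
--         if r < best:
--             best = r
--     return ('C', 'N', 'O', 'P', 'S', 'B')[best] if best < 6 else ''
-- ===== Notes on version B (the rewrite author's own statement) =====
-- stated objective: alternative
-- what changed: B fuses selection into the input scan: it maps each atom to a numeric precedence rank and keeps a running minimum in one pass, returning the atom for the best rank at the end, whereas A first tallies per-atom counts in a dict (two-phase) and then selects via a six-branch if-elif cascade over the counts.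
import Mathlib
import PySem

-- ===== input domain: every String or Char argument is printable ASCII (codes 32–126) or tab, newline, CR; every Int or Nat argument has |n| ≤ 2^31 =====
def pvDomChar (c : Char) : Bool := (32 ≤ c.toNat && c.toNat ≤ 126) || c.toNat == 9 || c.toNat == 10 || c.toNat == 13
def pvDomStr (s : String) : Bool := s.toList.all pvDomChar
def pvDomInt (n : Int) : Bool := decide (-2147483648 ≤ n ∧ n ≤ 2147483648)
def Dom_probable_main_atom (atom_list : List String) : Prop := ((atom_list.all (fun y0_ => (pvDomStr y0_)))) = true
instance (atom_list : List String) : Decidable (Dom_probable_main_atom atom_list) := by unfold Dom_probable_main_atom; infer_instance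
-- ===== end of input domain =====

-- B replaces A's two-phase tally-dict + if-elif cascade by a single pass keeping a running minimum of a numeric precedence rank (objective: alternative).

-- ===== PORT A =====
def probable_main_atom (atom_list : List String) : String :=
  let probable_bonding_count : PySem.Dict String Int :=
    PySem.Dict.ofList [("C", 0), ("N", 0), ("O", 0), ("S", 0), ("B", 0), ("P", 0)]
  let d := atom_list.foldl (fun d letter =>
      match d.get? letter with              -- try: d[letter] … except KeyError: pass
      | some atom_count => d.insert letter (atom_count + 1)
      | none => d) probable_bonding_count
  if d.getD "C" 0 > 0 then "C"
  else if d.getD "N" 0 > 0 then "N"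
  else if d.getD "O" 0 > 0 then "O"
  else if d.getD "P" 0 > 0 then "P"
  else if d.getD "S" 0 > 0 then "S"
  else if d.getD "B" 0 > 0 then "B"
  else ""

-- ===== PORT B =====
-- rank.get(atom, 6)
def pmaRank (atom : String) : Int :=
  (PySem.Dict.ofList [("C", 0), ("N", 1), ("O", 2), ("P", 3), ("S", 4), ("B", 5)]).getD atom 6

def probable_main_atom_alt (atom_list : List String) : String :=
  let best := atom_list.foldl (fun best atom =>
      let r := pmaRank atom
      if r < best then r else best) 6
  -- ('C','N','O','P','S','B')[best]: tuple indexing, exact since the guard keeps best in range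
  if best < 6 then (PySem.List.pyGet? ["C", "N", "O", "P", "S", "B"] best).getD "" else ""

-- ===== PRECONDITION & SPEC =====
def Spec_probable_main_atom (atom_list : List String) (out : String) : Prop := out = probable_main_atom_alt atom_list
instance (atom_list : List String) (out : String) : Decidable (Spec_probable_main_atom atom_list out) := by unfold Spec_probable_main_atom; infer_instance

-- ===== CLAIM (what is proved, stated in full; the proofs are below) =====
def Claim_equal_probable_main_atom : Prop := ∀ (atom_list : List String), Dom_probable_main_atom atom_list → Spec_probable_main_atom atom_list (probable_main_atom atom_list)

-- ===== LEMMAS AND PROOFS =====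

-- the first-present-by-precedence value both programs compute
def pmaSpec (xs : List String) : String :=
  if "C" ∈ xs then "C" else if "N" ∈ xs then "N" else if "O" ∈ xs then "O"
  else if "P" ∈ xs then "P" else if "S" ∈ xs then "S" else if "B" ∈ xs then "B" else ""

-- the minimum precedence rank occurring in xs (6 if none)
def pmaRuleRank (xs : List String) : Int :=
  if "C" ∈ xs then 0 else if "N" ∈ xs then 1 else if "O" ∈ xs then 2
  else if "P" ∈ xs then 3 else if "S" ∈ xs then 4 else if "B" ∈ xs then 5 else 6

lemma pmaRank_eq (a : String) :
    pmaRank a = if a = "C" then 0 else if a = "N" then 1 else if a = "O" then 2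
      else if a = "P" then 3 else if a = "S" then 4 else if a = "B" then 5 else 6 := by
  unfold pmaRank
  simp only [PySem.Dict.ofList, PySem.Dict.update, List.foldl_cons, List.foldl_nil,
    PySem.Dict.getD_eq_get?_getD, PySem.Dict.get?_insert, PySem.Dict.get?_empty]
  split_ifs <;> simp_all

lemma pmaRuleRank_le (xs : List String) : pmaRuleRank xs ≤ 6 := by
  unfold pmaRuleRank; split_ifs <;> omega

set_option maxHeartbeats 1000000 in
lemma pmaRuleRank_cons (x : String) (xs : List String) :
    pmaRuleRank (x :: xs) = min (pmaRank x) (pmaRuleRank xs) := by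
  rw [pmaRank_eq]
  unfold pmaRuleRank
  simp only [List.mem_cons]
  split_ifs <;> first | omega | simp_all

lemma pma_fold_eq (xs : List String) (acc : Int) (h : acc ≤ 6) :
    xs.foldl (fun best atom => let r := pmaRank atom; if r < best then r else best) acc
      = min acc (pmaRuleRank xs) := by
  induction xs generalizing acc with
  | nil => simp [pmaRuleRank]; omega
  | cons x rest ih =>
    simp only [List.foldl_cons]
    have hstep : (let r := pmaRank x; if r < acc then r else acc) = min (pmaRank x) acc := by
      simp only [min_def]; split_ifs <;> omega
    rw [hstep, ih _ (le_trans (min_le_right _ _) h), pmaRuleRank_cons]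
    rw [min_comm (pmaRank x) acc, min_assoc]

lemma pma_fold_getD (k : String) (xs : List String) (d : PySem.Dict String Int)
    (h : d.contains k = true) :
    (xs.foldl (fun d letter =>
      match d.get? letter with
      | some atom_count => d.insert letter (atom_count + 1)
      | none => d) d).getD k 0 = d.getD k 0 + (xs.count k : Int) := by
  induction xs generalizing d with
  | nil => simp
  | cons x rest ih =>
    simp only [List.foldl_cons]
    cases hx : d.get? x with
    | some c =>
      dsimp only
      rw [ih _ (by simp [PySem.Dict.contains_insert, h])]
      rw [PySem.Dict.getD_insert]
      by_cases hk : k = x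
      · subst hk
        rw [if_pos rfl, PySem.Dict.getD_eq_get?_getD, hx]
        simp
        ring
      · rw [if_neg hk]
        have hxk : ¬ x = k := fun h' => hk h'.symm
        simp [hxk]
    | none =>
      dsimp only
      rw [ih _ h]
      have hxk : ¬ (x = k) := by
        intro he; subst he
        rw [PySem.Dict.contains_eq_isSome_get?, hx] at h; simp at h
      simp [hxk]

lemma pma_A_eq_spec (xs : List String) : probable_main_atom xs = pmaSpec xs := by
  simp only [probable_main_atom]
  rw [pma_fold_getD "C" _ _ (by decide), pma_fold_getD "N" _ _ (by decide),
      pma_fold_getD "O" _ _ (by decide), pma_fold_getD "P" _ _ (by decide),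
      pma_fold_getD "S" _ _ (by decide), pma_fold_getD "B" _ _ (by decide)]
  rw [show (PySem.Dict.ofList [("C", (0:Int)), ("N", 0), ("O", 0), ("S", 0), ("B", 0), ("P", 0)]).getD "C" 0 = 0 from by decide,
      show (PySem.Dict.ofList [("C", (0:Int)), ("N", 0), ("O", 0), ("S", 0), ("B", 0), ("P", 0)]).getD "N" 0 = 0 from by decide,
      show (PySem.Dict.ofList [("C", (0:Int)), ("N", 0), ("O", 0), ("S", 0), ("B", 0), ("P", 0)]).getD "O" 0 = 0 from by decide,
      show (PySem.Dict.ofList [("C", (0:Int)), ("N", 0), ("O", 0), ("S", 0), ("B", 0), ("P", 0)]).getD "P" 0 = 0 from by decide,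
      show (PySem.Dict.ofList [("C", (0:Int)), ("N", 0), ("O", 0), ("S", 0), ("B", 0), ("P", 0)]).getD "S" 0 = 0 from by decide,
      show (PySem.Dict.ofList [("C", (0:Int)), ("N", 0), ("O", 0), ("S", 0), ("B", 0), ("P", 0)]).getD "B" 0 = 0 from by decide]
  simp [pmaSpec, List.count_pos_iff]

lemma pma_B_eq_spec (xs : List String) : probable_main_atom_alt xs = pmaSpec xs := by
  simp only [probable_main_atom_alt]
  rw [pma_fold_eq xs 6 (by omega), min_eq_right (pmaRuleRank_le xs)]
  unfold pmaRuleRank pmaSpec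
  split_ifs <;> first | decide | omega

-- ===== VERDICT (by name: the statement is the Claim_ definition above) =====
theorem probable_main_atom_spec : Claim_equal_probable_main_atom := by
  intro atom_list _
  unfold Spec_probable_main_atom
  rw [pma_A_eq_spec, pma_B_eq_spec]
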